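-- pv_equiv track=rewrite | github.com/Thor07860/Spec_sheet_engine_final | app/services/serper_service.py | _is_manufacturer_domain
-- ===== SOURCE A (Python) =====
-- def _is_manufacturer_domain(domain: str) -> bool:
--     """Return True when domain matches any known manufacturer root or subdomain."""
--     if not domain:
--         return False
--
--     clean = domain.lower().strip()
--     if clean.startswith("www."):
--         clean = clean[4:]
--
--     manufacturer_roots = {
--         "solaredge.com",
--         "enphase.com",
--         "fronius.com",
--         "sma-america.com",
--         "tesla.com",
--         "generac.com",
--         "panasonic.com",
--         "qcells.com",
--         "canadiansolar.com",
--         "trinasolar.com",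
--         "jinkosolar.com",
--         "longi.com",
--         "sunpower.com",
--         "apsystems.com",
--         "tigoenergy.com",
--         "hoymiles.com",
--         "schneider-electric.com",
--         "recgroup.com",
--         "siemens.com",
--         "eaton.com",
--     }
--
--     for root in manufacturer_roots:
--         if clean == root or clean.endswith(f".{root}"):
--             return True
--     return False
-- ===== SOURCE B (Python) =====
-- def _is_manufacturer_domain(domain: str) -> bool:
--     """Return True when domain matches any known manufacturer root or subdomain."""
--     if not domain:
--         return False
--
--     clean = domain.lower().strip()
--     if clean.startswith("www."):
--         clean = clean[4:]
--
--     manufacturer_roots = {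
--         "solaredge.com",
--         "enphase.com",
--         "fronius.com",
--         "sma-america.com",
--         "tesla.com",
--         "generac.com",
--         "panasonic.com",
--         "qcells.com",
--         "canadiansolar.com",
--         "trinasolar.com",
--         "jinkosolar.com",
--         "longi.com",
--         "sunpower.com",
--         "apsystems.com",
--         "tigoenergy.com",
--         "hoymiles.com",
--         "schneider-electric.com",
--         "recgroup.com",
--         "siemens.com",
--         "eaton.com",
--     }
--
--     # Walk the dot-separated suffixes of the domain, testing each one by a
--     # single set lookup, instead of scanning every root with endswith.
--     s = clean
--     while True:
--         if s in manufacturer_roots: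
--             return True
--         dot = s.find(".")
--         if dot == -1:
--             return False
--         s = s[dot + 1:]
-- ===== Notes on version B (the rewrite author's own statement) =====
-- stated objective: alternative
-- what changed: Instead of looping over all 20 roots doing equality/endswith tests, B walks the dot-separated suffixes of the cleaned domain and does one set-membership lookup per suffix.
import Mathlib
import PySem

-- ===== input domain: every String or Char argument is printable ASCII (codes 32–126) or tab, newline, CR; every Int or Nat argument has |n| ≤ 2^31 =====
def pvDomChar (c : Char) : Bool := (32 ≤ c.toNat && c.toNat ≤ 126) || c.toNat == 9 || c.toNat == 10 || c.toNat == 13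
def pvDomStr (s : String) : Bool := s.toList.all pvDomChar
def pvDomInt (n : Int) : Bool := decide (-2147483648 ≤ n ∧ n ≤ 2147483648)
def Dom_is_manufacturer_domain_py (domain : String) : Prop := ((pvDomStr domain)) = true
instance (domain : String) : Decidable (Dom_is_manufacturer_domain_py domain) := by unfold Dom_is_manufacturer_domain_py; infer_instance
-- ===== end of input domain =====

-- B replaces A's scan over all 20 roots (equality or endswith per root) by a walk over the
-- dot-separated suffixes of the cleaned domain with one set-membership test per suffix (objective: alternative).

-- the manufacturer_roots set literal, shared verbatim by both Pythons
def pvRoots : List String :=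
  ["solaredge.com", "enphase.com", "fronius.com", "sma-america.com", "tesla.com",
   "generac.com", "panasonic.com", "qcells.com", "canadiansolar.com", "trinasolar.com",
   "jinkosolar.com", "longi.com", "sunpower.com", "apsystems.com", "tigoenergy.com",
   "hoymiles.com", "schneider-electric.com", "recgroup.com", "siemens.com", "eaton.com"]

-- ===== PORT A =====
-- A's for-loop over the roots: return True on the first root that matches, else False
def pvLoopA (clean : String) : List String → Bool
  | [] => false
  | r :: rs => if clean == r || PySem.Str.endswith clean ("." ++ r) then true else pvLoopA clean rs

def is_manufacturer_domain_py (domain : String) : Bool :=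
  if domain == "" then false
  else
    let clean0 := PySem.Str.strip (PySem.Str.lower domain)
    let clean := if PySem.Str.startswith clean0 "www." then PySem.Str.slice clean0 (some 4) none else clean0
    pvLoopA clean pvRoots

-- ===== PORT B =====
-- B's while-loop: membership test on the current suffix, then step past the first dot
def pvHasRoot (s : String) (roots : List String) : Bool :=
  if roots.contains s then true
  else
    let dot := PySem.Str.find s "."
    if dot = -1 then false
    else pvHasRoot (PySem.Str.slice s (some (dot + 1)) none) roots
termination_by s.toList.length
decreasing_by
  rename_i hne
  have hfind : PySem.Str.find s "." = PySem.Chars.find s.toList ['.'] := by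
    simp [PySem.Str.find_eq]
  have hne' : PySem.Chars.find s.toList ['.'] ≠ -1 := by
    rw [← hfind]; exact hne
  have h0 : 0 ≤ PySem.Chars.find s.toList ['.'] := by
    have := PySem.Chars.neg_one_le_find (s := s.toList) (sub := ['.'])
    omega
  have hinf : ['.'] <:+: s.toList :=
    (PySem.Chars.find_ne_neg_one_iff (s := s.toList) (sub := ['.'])).mp hne'
  have hlen : 0 < s.toList.length := by
    rcases hinf with ⟨l₁, l₂, h⟩
    have : s.toList.length = l₁.length + 1 + l₂.length := by
      rw [← h]; simp; omega
    omega
  have hsl : (PySem.Str.slice s (some (PySem.Str.find s "." + 1)) none).toList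
      = s.toList.drop (PySem.Str.find s "." + 1).toNat := by
    rw [PySem.Str.toList_slice, PySem.Chars.slice_eq_listSlice, PySem.List.slice_from]
    rw [hfind]; omega
  rw [hsl]
  simp only [List.length_drop]
  rw [hfind] at *
  omega

def is_manufacturer_domain_py_alt (domain : String) : Bool :=
  if domain == "" then false
  else
    let clean0 := PySem.Str.strip (PySem.Str.lower domain)
    let clean := if PySem.Str.startswith clean0 "www." then PySem.Str.slice clean0 (some 4) none else clean0
    pvHasRoot clean pvRoots

-- ===== PRECONDITION & SPEC =====
def Spec_is_manufacturer_domain_py (domain : String) (out : Bool) : Prop := out = is_manufacturer_domain_py_alt domain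
instance (domain : String) (out : Bool) : Decidable (Spec_is_manufacturer_domain_py domain out) := by unfold Spec_is_manufacturer_domain_py; infer_instance

-- ===== CLAIM (what is proved, stated in full; the proofs are below) =====
def Claim_equal_is_manufacturer_domain_py : Prop := ∀ (domain : String), Dom_is_manufacturer_domain_py domain → Spec_is_manufacturer_domain_py domain (is_manufacturer_domain_py domain)

-- ===== LEMMAS AND PROOFS =====

-- "s matches some root r ∈ roots: equal to it, or ends with '.' ++ r"
def pvSufPred (roots : List String) (s : List Char) : Prop :=
  ∃ r ∈ roots, s = r.toList ∨ ('.' :: r.toList) <:+ s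

theorem pvLoopA_iff (roots : List String) (clean : String) :
    pvLoopA clean roots = true ↔ pvSufPred roots clean.toList := by
  induction roots with
  | nil => simp [pvLoopA, pvSufPred]
  | cons r rs ih =>
    simp only [pvLoopA, pvSufPred]
    by_cases h : clean == r || PySem.Str.endswith clean ("." ++ r)
    · simp only [h]
      simp only [Bool.or_eq_true, beq_iff_eq, PySem.Str.endswith_eq,
        PySem.Chars.endswith_iff, String.toList_append] at h
      constructor
      · intro _
        refine ⟨r, by simp, ?_⟩
        rcases h with h | h
        · exact Or.inl (by rw [h])
        · exact Or.inr (by simpa using h)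
      · intro _; trivial
    · rw [if_neg h, ih]
      simp only [Bool.or_eq_true, beq_iff_eq, PySem.Str.endswith_eq,
        PySem.Chars.endswith_iff, String.toList_append, not_or] at h
      unfold pvSufPred
      constructor
      · rintro ⟨x, hx, hm⟩; exact ⟨x, by simp [hx], hm⟩
      · rintro ⟨x, hx, hm⟩
        rcases List.mem_cons.mp hx with rfl | hx
        · exfalso
          rcases hm with hm | hm
          · exact h.1 (String.ext hm)
          · exact h.2 (by simpa using hm)
        · exact ⟨x, hx, hm⟩

theorem pv_singleton_prefix {l : List Char} (h : ['.'] <+: l) : l = '.' :: l.tail := by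
  rcases h with ⟨u, hu⟩
  rw [← hu]; rfl

-- splitting a dotted suffix at the FIRST dot of s
theorem pv_dot_suffix_iff (s : List Char) (h0 : 0 ≤ PySem.Chars.find s ['.']) (r : List Char) :
    (('.' :: r) <:+ s) ↔
      (r = s.drop ((PySem.Chars.find s ['.']).toNat + 1) ∨
       ('.' :: r) <:+ s.drop ((PySem.Chars.find s ['.']).toNat + 1)) := by
  set d := (PySem.Chars.find s ['.']).toNat with hd
  obtain ⟨hpre, hmin⟩ := PySem.Chars.find_spec (s := s) (sub := ['.']) h0
  have htail : (s.drop d).tail = s.drop (d + 1) := by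
    rw [← List.drop_one, List.drop_drop, Nat.add_comm]
  have hdrop : s.drop d = '.' :: s.drop (d + 1) := by
    rw [← htail]
    exact pv_singleton_prefix hpre
  constructor
  · rintro ⟨p, hp⟩
    have hdi : s.drop p.length = '.' :: r := by
      rw [← hp, List.drop_left]
    have hge : d ≤ p.length := by
      by_contra hlt
      exact hmin p.length (by omega) (by rw [hdi]; exact ⟨r, rfl⟩)
    rcases Nat.eq_or_lt_of_le hge with heq | hlt
    · left
      rw [← heq] at hdi
      rw [hdrop] at hdi
      exact (List.cons.injEq _ _ _ _ ▸ hdi).2.symm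
    · right
      have : s.drop p.length = (s.drop (d + 1)).drop (p.length - (d + 1)) := by
        rw [List.drop_drop]
        congr 1
        omega
      rw [this] at hdi
      rw [← hdi]
      exact List.drop_suffix _ _
  · rintro (rfl | hsuf)
    · rw [← hdrop]
      exact List.drop_suffix _ _
    · exact hsuf.trans (List.drop_suffix _ _)

theorem pv_contains_iff (roots : List String) (s : String) :
    roots.contains s = true ↔ ∃ r ∈ roots, s.toList = r.toList := by
  simp only [List.contains_iff_mem]
  constructor
  · intro h; exact ⟨s, h, rfl⟩
  · rintro ⟨r, hr, h⟩
    have : s = r := String.ext h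
    rw [this]; exact hr

theorem pv_find_bridge (s : String) :
    PySem.Str.find s "." = PySem.Chars.find s.toList ['.'] := by
  simp [PySem.Str.find_eq]

theorem pvHasRoot_iff (n : ℕ) : ∀ (s : String), s.toList.length ≤ n → ∀ (roots : List String),
    (pvHasRoot s roots = true ↔ pvSufPred roots s.toList) := by
  induction n with
  | zero =>
    intro s hs roots
    have hnil : s.toList = [] := List.eq_nil_of_length_eq_zero (by omega)
    have hfneg : PySem.Str.find s "." = -1 := by
      rw [pv_find_bridge, PySem.Chars.find_eq_neg_one_iff, hnil]
      rintro ⟨l₁, l₂, h⟩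
      have := congrArg List.length h
      simp at this
    rw [pvHasRoot]
    simp only [hfneg]
    by_cases hc : roots.contains s = true
    · simp only [hc, if_true]
      constructor
      · intro _
        rcases (pv_contains_iff roots s).mp hc with ⟨r, hr, h⟩
        exact ⟨r, hr, Or.inl h⟩
      · intro _; trivial
    · simp only [Bool.not_eq_true] at hc
      simp only [hc, Bool.false_eq_true, if_false]
      constructor
      · intro h; exact absurd h (by simp)
      · rintro ⟨r, hr, h | h⟩
        · exact absurd ((pv_contains_iff roots s).mpr ⟨r, hr, h⟩) (by rw [hc]; simp)
        · rw [hnil] at h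
          rcases h with ⟨p, hp⟩
          have := congrArg List.length hp
          simp at this
  | succ m ih =>
    intro s hs roots
    rw [pvHasRoot]
    by_cases hc : roots.contains s = true
    · simp only [hc, if_true]
      constructor
      · intro _
        rcases (pv_contains_iff roots s).mp hc with ⟨r, hr, h⟩
        exact ⟨r, hr, Or.inl h⟩
      · intro _; trivial
    · simp only [Bool.not_eq_true] at hc
      simp only [hc, Bool.false_eq_true, if_false]
      by_cases hne : PySem.Str.find s "." = -1
      · simp only [hne]
        have hninf : ¬ ['.'] <:+: s.toList :=
          (PySem.Chars.find_eq_neg_one_iff (s := s.toList) (sub := ['.'])).mp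
            (by rw [← pv_find_bridge]; exact hne)
        constructor
        · intro h; exact absurd h (by simp)
        · rintro ⟨r, hr, h | h⟩
          · exact absurd ((pv_contains_iff roots s).mpr ⟨r, hr, h⟩) (by rw [hc]; simp)
          · exact absurd ((show ['.'] <:+: ('.' :: r.toList) from ⟨[], r.toList, by simp⟩).trans h.isInfix) hninf
      · rw [if_neg hne]
        have h0 : 0 ≤ PySem.Chars.find s.toList ['.'] := by
          have h1 := PySem.Chars.neg_one_le_find (s := s.toList) (sub := ['.'])
          rw [pv_find_bridge] at hne
          omega
        set d := PySem.Chars.find s.toList ['.'] with hd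
        have hdn : (PySem.Str.find s "." + 1).toNat = d.toNat + 1 := by
          rw [pv_find_bridge, ← hd]; omega
        have hsl : (PySem.Str.slice s (some (PySem.Str.find s "." + 1)) none).toList
            = s.toList.drop (d.toNat + 1) := by
          rw [PySem.Str.toList_slice, PySem.Chars.slice_eq_listSlice, PySem.List.slice_from, hdn]
          rw [pv_find_bridge, ← hd]; omega
        have hlen0 : 0 < s.toList.length := by
          have hinf : ['.'] <:+: s.toList :=
            (PySem.Chars.find_ne_neg_one_iff (s := s.toList) (sub := ['.'])).mp
              (by rw [← pv_find_bridge]; exact hne)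
          rcases hinf with ⟨l₁, l₂, h⟩
          have hL := congrArg List.length h
          simp only [List.length_append, List.length_cons, List.length_nil] at hL
          omega
        have hle : (PySem.Str.slice s (some (PySem.Str.find s "." + 1)) none).toList.length ≤ m := by
          rw [hsl, List.length_drop]; omega
        rw [ih _ hle roots]
        unfold pvSufPred
        rw [hsl]
        constructor
        · rintro ⟨r, hr, h | h⟩
          · exact ⟨r, hr, Or.inr ((pv_dot_suffix_iff s.toList h0 r.toList).mpr (Or.inl h.symm))⟩
          · exact ⟨r, hr, Or.inr ((pv_dot_suffix_iff s.toList h0 r.toList).mpr (Or.inr h))⟩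
        · rintro ⟨r, hr, h | h⟩
          · exact absurd ((pv_contains_iff roots s).mpr ⟨r, hr, h⟩) (by rw [hc]; simp)
          · rcases (pv_dot_suffix_iff s.toList h0 r.toList).mp h with h' | h'
            · exact ⟨r, hr, Or.inl h'.symm⟩
            · exact ⟨r, hr, Or.inr h'⟩

theorem pvLoopA_eq_pvHasRoot (s : String) (roots : List String) :
    pvLoopA s roots = pvHasRoot s roots := by
  have h1 := pvLoopA_iff roots s
  have h2 := pvHasRoot_iff s.toList.length s le_rfl roots
  cases hA : pvLoopA s roots <;> cases hB : pvHasRoot s roots <;> simp_all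

-- ===== VERDICT (by name: the statement is the Claim_ definition above) =====
theorem is_manufacturer_domain_py_spec : Claim_equal_is_manufacturer_domain_py := by
  intro domain _
  unfold Spec_is_manufacturer_domain_py is_manufacturer_domain_py is_manufacturer_domain_py_alt
  by_cases h : domain == "" <;> simp [h, pvLoopA_eq_pvHasRoot]
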